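-- pv_equiv track=rewrite | github.com/thelalem/CompetitiveP-Repository | 16-Jul-2024/K Items With the Maximum Sum 180897.py | kItemsWithMaximumSum
-- ===== SOURCE A (Python) =====
-- def kItemsWithMaximumSum(numOnes: int, numZeros: int, numNegOnes: int, k: int) -> int:
--     res = 0
--     for i in range(k):
--         if numOnes > 0:
--             res += 1
--             numOnes -= 1
--         elif numZeros > 0:
--             numZeros -= 1
--         else:
--             res -= 1
--             numNegOnes -= 1
--     return res
-- ===== SOURCE B (Python) =====
-- def kItemsWithMaximumSum(numOnes: int, numZeros: int, numNegOnes: int, k: int) -> int: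
--     k = max(k, 0)
--     ones = min(max(numOnes, 0), k)
--     zeros = min(max(numZeros, 0), k - ones)
--     return ones - (k - ones - zeros)
-- ===== Notes on version B (the rewrite author's own statement) =====
-- stated objective: faster
-- what changed: Replaced the O(k) item-by-item simulation loop with a closed-form O(1) arithmetic formula: take min(numOnes,k) ones, then zeros, and subtract the leftover forced negative-ones.
import Mathlib
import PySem

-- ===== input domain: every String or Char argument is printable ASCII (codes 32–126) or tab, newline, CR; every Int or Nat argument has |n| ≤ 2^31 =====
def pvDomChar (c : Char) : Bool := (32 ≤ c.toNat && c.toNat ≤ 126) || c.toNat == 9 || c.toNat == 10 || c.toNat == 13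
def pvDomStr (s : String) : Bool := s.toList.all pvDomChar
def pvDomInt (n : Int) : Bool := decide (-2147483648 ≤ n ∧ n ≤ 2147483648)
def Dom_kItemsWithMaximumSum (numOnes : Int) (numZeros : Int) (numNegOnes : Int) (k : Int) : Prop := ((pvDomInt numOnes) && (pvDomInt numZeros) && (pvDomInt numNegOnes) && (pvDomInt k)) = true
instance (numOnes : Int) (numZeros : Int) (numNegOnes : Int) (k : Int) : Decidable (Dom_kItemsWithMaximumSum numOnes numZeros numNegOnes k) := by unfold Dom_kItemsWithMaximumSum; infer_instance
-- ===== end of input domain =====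

-- B replaces A's O(k) greedy simulation loop with an O(1) closed-form arithmetic formula (faster: asymptotic).

-- ===== PORT A =====
-- literal port of A's for-loop over range(k), state (res, numOnes, numZeros, numNegOnes)
def kItemsWithMaximumSum (numOnes : Int) (numZeros : Int) (numNegOnes : Int) (k : Int) : Int :=
  ((PySem.List.pyRange 0 k 1).foldl
    (fun (st : Int × Int × Int × Int) _ =>
      let (res, o, z, n) := st
      if o > 0 then (res + 1, o - 1, z, n)
      else if z > 0 then (res, o, z - 1, n)
      else (res - 1, o, z, n - 1))
    (0, numOnes, numZeros, numNegOnes)).1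

-- ===== PORT B =====
def kItemsWithMaximumSum_alt (numOnes : Int) (numZeros : Int) (numNegOnes : Int) (k : Int) : Int :=
  let k' := max k 0
  let ones := min (max numOnes 0) k'
  let zeros := min (max numZeros 0) (k' - ones)
  ones - (k' - ones - zeros)

-- ===== PRECONDITION & SPEC =====
def Spec_kItemsWithMaximumSum (numOnes : Int) (numZeros : Int) (numNegOnes : Int) (k : Int) (out : Int) : Prop := out = kItemsWithMaximumSum_alt numOnes numZeros numNegOnes k
instance (numOnes : Int) (numZeros : Int) (numNegOnes : Int) (k : Int) (out : Int) : Decidable (Spec_kItemsWithMaximumSum numOnes numZeros numNegOnes k out) := by unfold Spec_kItemsWithMaximumSum; infer_instance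

-- ===== CLAIM (what is proved, stated in full; the proofs are below) =====
def Claim_equal_kItemsWithMaximumSum : Prop := ∀ (numOnes : Int) (numZeros : Int) (numNegOnes : Int) (k : Int), Dom_kItemsWithMaximumSum numOnes numZeros numNegOnes k → Spec_kItemsWithMaximumSum numOnes numZeros numNegOnes k (kItemsWithMaximumSum numOnes numZeros numNegOnes k)

-- ===== LEMMAS AND PROOFS =====

-- the loop's step function
def pvStep (st : Int × Int × Int × Int) (_ : Int) : Int × Int × Int × Int :=
  let (res, o, z, n) := st
  if o > 0 then (res + 1, o - 1, z, n)
  else if z > 0 then (res, o, z - 1, n)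
  else (res - 1, o, z, n - 1)

-- closed form of the loop's result after |l| iterations, starting from (res, o, z, n)
lemma pvLoop_closed (l : List Int) (res o z n : Int) :
    ((l.foldl pvStep (res, o, z, n)).1) =
      res + (min (max o 0) (l.length : Int))
          - ((l.length : Int) - min (max o 0) (l.length : Int)
              - min (max z 0) ((l.length : Int) - min (max o 0) (l.length : Int))) := by
  induction l generalizing res o z n with
  | nil => simp
  | cons x xs ih =>
    simp only [List.foldl_cons, List.length_cons, pvStep]
    by_cases ho : o > 0
    · simp only [if_pos ho]
      rw [ih]
      push_cast
      omega
    · simp only [if_neg ho]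
      by_cases hz : z > 0
      · simp only [if_pos hz]
        rw [ih]
        push_cast
        omega
      · simp only [if_neg hz]
        rw [ih]
        push_cast
        omega

-- ===== VERDICT (by name: the statement is the Claim_ definition above) =====
theorem kItemsWithMaximumSum_spec : Claim_equal_kItemsWithMaximumSum := by
  intro numOnes numZeros numNegOnes k _
  unfold Spec_kItemsWithMaximumSum kItemsWithMaximumSum kItemsWithMaximumSum_alt
  have h : (fun (st : Int × Int × Int × Int) (_ : Int) =>
      let (res, o, z, n) := st
      if o > 0 then (res + 1, o - 1, z, n)
      else if z > 0 then (res, o, z - 1, n)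
      else (res - 1, o, z, n - 1)) = pvStep := rfl
  rw [h, pvLoop_closed]
  have hlen : ((PySem.List.pyRange 0 k 1).length : Int) = max k 0 := by
    rw [PySem.List.length_pyRange_one]
    omega
  rw [hlen]
  dsimp only
  omega
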